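-- pv_equiv track=rewrite | github.com/moritzs95/scoutseq | scripts/optional-parse/Parse_scOUT_seqDRO_extractor.py | all_gaps_trailing
-- ===== SOURCE A (Python) =====
-- def all_gaps_trailing(seq, mod):
--     if mod.startswith('D'):
--         # Find the first occurrence of a gap
--         first_gap_index = seq.find('-')
--
--         # If no gap is found, return True (since there are no gaps)
--         if first_gap_index == -1:
--             return True
--
--         # Check if all characters after the first gap are gaps
--         return all(char == '-' for char in seq[first_gap_index:])
--     else:
--         return False
-- ===== SOURCE B (Python) =====
-- def all_gaps_trailing(seq, mod):
--     if not mod.startswith('D'):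
--         return False
--     # Gaps are all trailing iff seq already equals its canonical partition:
--     # the non-gap characters (in order) followed by all the gap characters.
--     kept = [c for c in seq if c != '-']
--     return seq == ''.join(kept) + '-' * (len(seq) - len(kept))
-- ===== Notes on version B (the rewrite author's own statement) =====
-- stated objective: alternative
-- what changed: Instead of locating the first gap with find() and forward-scanning the suffix with all(), B rebuilds the canonical partition of the string (non-gap characters in order, then all gaps) and tests whether the input equals it.
import Mathlib
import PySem

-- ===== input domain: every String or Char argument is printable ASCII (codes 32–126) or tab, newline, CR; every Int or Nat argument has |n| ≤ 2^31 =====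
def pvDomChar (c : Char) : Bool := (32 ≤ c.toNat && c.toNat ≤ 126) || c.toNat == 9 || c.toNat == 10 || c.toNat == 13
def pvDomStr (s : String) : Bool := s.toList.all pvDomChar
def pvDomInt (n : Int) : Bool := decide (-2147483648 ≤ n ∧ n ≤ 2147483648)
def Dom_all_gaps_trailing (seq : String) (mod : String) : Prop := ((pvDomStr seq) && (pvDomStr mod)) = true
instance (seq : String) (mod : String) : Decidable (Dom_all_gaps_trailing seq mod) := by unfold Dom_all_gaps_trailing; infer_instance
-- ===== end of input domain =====

-- B replaces A's find-first-gap + forward all()-scan by rebuilding the canonical partition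
-- (non-gap characters, then all gaps) and comparing it with the input; objective: alternative.


-- ===== PORT A =====
def all_gaps_trailing (seq : String) (mod : String) : Bool :=
  if PySem.Str.startswith mod "D" then
    let first_gap_index := PySem.Str.find seq "-"
    if first_gap_index = -1 then true
    else (PySem.Str.slice seq (some first_gap_index) none).toList.all (fun c => c == '-')
  else false

-- ===== PORT B =====
-- '-' * n is ported by hand as List.replicate n '-' (exact: string repetition of a single
-- character); the final Python string equality is compared on .toList (exact: String equality
-- is code-point-list equality).
def all_gaps_trailing_alt (seq : String) (mod : String) : Bool :=
  if !(PySem.Str.startswith mod "D") then false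
  else
    let kept := seq.toList.filter (fun c => !(c == '-'))
    seq.toList == kept ++ List.replicate (seq.toList.length - kept.length) '-'

-- ===== PRECONDITION & SPEC =====
def Spec_all_gaps_trailing (seq : String) (mod : String) (out : Bool) : Prop := out = all_gaps_trailing_alt seq mod
instance (seq : String) (mod : String) (out : Bool) : Decidable (Spec_all_gaps_trailing seq mod out) := by unfold Spec_all_gaps_trailing; infer_instance

-- ===== CLAIM (what is proved, stated in full; the proofs are below) =====
def Claim_equal_all_gaps_trailing : Prop := ∀ (seq : String) (mod : String), Dom_all_gaps_trailing seq mod → Spec_all_gaps_trailing seq mod (all_gaps_trailing seq mod)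

-- ===== LEMMAS AND PROOFS =====

-- 'good cs': every character from the first '-' onward is '-' (the intended meaning of both sides).
def good : List Char → Bool
  | [] => true
  | c :: t => if c = '-' then t.all (fun x => x == '-') else good t

lemma good_of_not_mem (cs : List Char) (h : '-' ∉ cs) : good cs = true := by
  induction cs with
  | nil => rfl
  | cons c t ih =>
    simp only [List.mem_cons, not_or] at h
    simp [good, Ne.symm h.1, ih h.2]

-- A's core equals 'good': first-occurrence characterisation.
lemma good_of_first (cs : List Char) (k : Nat) (hk : cs[k]? = some '-')
    (hmin : ∀ i, i < k → cs[i]? ≠ some '-') :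
    (cs.drop k).all (fun c => c == '-') = good cs := by
  induction cs generalizing k with
  | nil => simp at hk
  | cons c t ih =>
    cases k with
    | zero =>
      simp only [List.getElem?_cons_zero, Option.some.injEq] at hk
      subst hk
      simp [good]
    | succ k =>
      have hc : c ≠ '-' := by
        intro h; exact hmin 0 (Nat.succ_pos k) (by simp [h])
      simp only [List.getElem?_cons_succ] at hk
      have := ih k hk (fun i hi => by
        have := hmin (i + 1) (Nat.succ_lt_succ hi)
        simpa using this)
      simpa [good, hc] using this

lemma A_eq_good (cs : List Char) :
    (if PySem.Chars.find cs ['-'] = -1 then true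
     else (cs.drop (PySem.Chars.find cs ['-']).toNat).all (fun c => c == '-')) = good cs := by
  by_cases h : PySem.Chars.find cs ['-'] = -1
  · have hnm : ¬ ['-'] <:+: cs := (PySem.Chars.find_eq_neg_one_iff cs ['-']).1 h
    have : '-' ∉ cs := by
      intro hm
      exact hnm ((List.singleton_infix_iff _ _).2 hm)
    simp [h, good_of_not_mem cs this]
  · have hge : 0 ≤ PySem.Chars.find cs ['-'] := by
      have := PySem.Chars.neg_one_le_find cs ['-']
      omega
    obtain ⟨hpre, hmin⟩ := PySem.Chars.find_spec (s := cs) (sub := ['-']) hge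
    set k := (PySem.Chars.find cs ['-']).toNat with hkdef
    have hk : cs[k]? = some '-' := by
      obtain ⟨t, ht⟩ := hpre
      have : (cs.drop k)[0]? = some '-' := by rw [← ht]; rfl
      simpa [List.getElem?_drop] using this
    have hmin' : ∀ i, i < k → cs[i]? ≠ some '-' := by
      intro i hi hcontra
      apply hmin i hi
      have : (cs.drop i)[0]? = some '-' := by simpa [List.getElem?_drop] using hcontra
      obtain ⟨hd, tl, hdt⟩ : ∃ hd tl, cs.drop i = hd :: tl := by
        cases hdrop : cs.drop i with
        | nil => rw [hdrop] at this; simp at this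
        | cons a b => exact ⟨a, b, rfl⟩
      rw [hdt] at this ⊢
      simp only [List.getElem?_cons_zero, Option.some.injEq] at this
      subst this
      exact ⟨tl, rfl⟩
    simp only [h, if_false]
    exact good_of_first cs k hk hmin'

-- B's core equals 'good': cs equals its canonical partition iff every gap is trailing.
lemma canon_iff_good (cs : List Char) :
    (cs = cs.filter (fun c => !(c == '-'))
            ++ List.replicate (cs.length - (cs.filter (fun c => !(c == '-'))).length) '-')
    ↔ good cs = true := by
  induction cs with
  | nil => simp [good]
  | cons c t ih =>
    by_cases hc : c = '-'
    · subst hc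
      have hle : (t.filter (fun c => !(c == '-'))).length ≤ t.length := List.length_filter_le _ _
      simp only [List.filter_cons, show (!(('-' : Char) == '-')) = false by decide, Bool.false_eq_true,
        if_false, List.length_cons, good]
      have hk : t.length + 1 - (t.filter (fun c => !(c == '-'))).length
          = (t.length - (t.filter (fun c => !(c == '-'))).length) + 1 := by omega
      rw [hk]
      by_cases hall : t.all (fun x => x == '-') = true
      · have hfilt : t.filter (fun c => !(c == '-')) = [] := by
          apply List.filter_eq_nil_iff.2
          intro a ha
          have := List.all_eq_true.1 hall a ha
          simpa using this
        have ht : t = List.replicate t.length '-' := by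
          apply List.eq_replicate_of_mem
          intro a ha
          have := List.all_eq_true.1 hall a ha
          simpa using this
        simp only [hfilt, List.length_nil, Nat.sub_zero, List.nil_append, hall]
        conv_lhs => rw [ht]
        simp [List.replicate_succ]
      · simp only [hall]
        rw [if_pos trivial]
        simp only [Bool.false_eq_true, iff_false]
        intro heq
        have hmem : ∃ a ∈ t, ¬ (a == '-') = true := by
          by_contra hcon
          refine hall (List.all_eq_true.2 ?_)
          intro a ha
          by_contra hne
          exact hcon ⟨a, ha, hne⟩
        obtain ⟨a, ha, hane⟩ := hmem
        have hamem : a ∈ t.filter (fun c => !(c == '-')) := by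
          simp only [List.mem_filter]
          exact ⟨ha, by simpa using hane⟩
        cases hf : t.filter (fun c => !(c == '-')) with
        | nil => rw [hf] at hamem; simp at hamem
        | cons b r =>
          have hb : b ∈ t.filter (fun c => !(c == '-')) := by rw [hf]; exact List.mem_cons_self
          have hbne : b ≠ '-' := by
            have := (List.mem_filter.1 hb).2
            simpa using this
          rw [hf] at heq
          have : ('-' : Char) = b := by
            have := congrArg (fun l => l.head?) heq
            simpa using this
          exact hbne this.symm
    · have hcb : (!((c == '-'))) = true := by simpa using hc
      simp only [List.filter_cons, hcb, if_true, List.length_cons, good, hc, if_false]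
      have hk : t.length + 1 - ((t.filter (fun c => !(c == '-'))).length + 1)
          = t.length - (t.filter (fun c => !(c == '-'))).length := by omega
      rw [hk, List.cons_append, List.cons_eq_cons]
      constructor
      · rintro ⟨-, h⟩; exact ih.1 h
      · intro h; exact ⟨rfl, ih.2 h⟩

-- ===== VERDICT (by name: the statement is the Claim_ definition above) =====
theorem all_gaps_trailing_spec : Claim_equal_all_gaps_trailing := by
  intro seq mod _
  unfold Spec_all_gaps_trailing all_gaps_trailing all_gaps_trailing_alt
  by_cases hd : PySem.Str.startswith mod "D" = true
  · simp only [hd, if_true, Bool.not_true, Bool.false_eq_true, if_false]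
    simp only [PySem.Str.find_eq, PySem.Str.toList_slice, PySem.Chars.slice_eq_listSlice,
      show ("-" : String).toList = ['-'] from rfl]
    have hB : (seq.toList == seq.toList.filter (fun c => !(c == '-'))
            ++ List.replicate (seq.toList.length - (seq.toList.filter (fun c => !(c == '-'))).length) '-')
        = good seq.toList := by
      rw [Bool.eq_iff_iff, beq_iff_eq]
      exact canon_iff_good seq.toList
    rw [hB, ← A_eq_good seq.toList]
    by_cases h : PySem.Chars.find seq.toList ['-'] = -1
    · simp [h]
    · have hge : 0 ≤ PySem.Chars.find seq.toList ['-'] := by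
        have := PySem.Chars.neg_one_le_find seq.toList ['-']
        omega
      rw [if_neg h, if_neg h, PySem.List.slice_from _ hge]
  · simp only [Bool.not_eq_true] at hd
    have hd' : PySem.Chars.startswith mod.toList ['D'] = false := by simpa using hd
    simp [hd']
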